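-- pv_equiv track=rewrite | github.com/pyunity/pyunity | prepare.py | formatAll
-- ===== SOURCE A (Python) =====
-- def formatAll(list, width=79):
--     """
--     Formats the ``__all__`` attribute of a module
--     with line wrapping.
--
--     Parameters
--     ----------
--     list : list
--         List of variable names exported
--     width : int, optional
--         Maximum width of a line, defaults to 79
--
--     Returns
--     -------
--     string
--         The formatted list
--
--     """
--     text = "__all__ = ["
--     indent = len(text)
--     limit = width - indent
--     length = 0
--     for item in list:
--         length += len(item) + 4
--         if length > limit:
--             # Line wrap
--             text += "\n" + " " * indent
--             # 4 includes ("", )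
--             length = len(item) + 4
--         text += "\"" + item + "\", "
--     if len(list):
--         # Remove comma if non-empty
--         text = text[:-2]
--     text += "]"
--     return text
-- ===== SOURCE B (Python) =====
-- def formatAll(list, width=79):
--     header = "__all__ = ["
--     indent = len(header)
--     limit = width - indent
--     # grouping pass: partition the items into lines
--     lines = []
--     cur = []
--     length = 0
--     for item in list:
--         length += len(item) + 4
--         if length > limit:
--             lines.append(cur)
--             cur = []
--             length = len(item) + 4
--         cur.append(item)
--     lines.append(cur)
--     # rendering pass: format each line, join, strip trailing ', '
--     sep = "\n" + " " * indent
--     body = sep.join("".join('"' + it + '", ' for it in line) for line in lines)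
--     text = header + body
--     if len(list):
--         text = text[:-2]
--     return text + "]"
-- ===== Notes on version B (the rewrite author's own statement) =====
-- stated objective: alternative
-- what changed: A's single fused loop that interleaves wrapping decisions with string building is split into two separate passes: a grouping pass that partitions the items into line lists, then a rendering pass that formats each line and joins lines with the newline+indent separator.
import Mathlib
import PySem

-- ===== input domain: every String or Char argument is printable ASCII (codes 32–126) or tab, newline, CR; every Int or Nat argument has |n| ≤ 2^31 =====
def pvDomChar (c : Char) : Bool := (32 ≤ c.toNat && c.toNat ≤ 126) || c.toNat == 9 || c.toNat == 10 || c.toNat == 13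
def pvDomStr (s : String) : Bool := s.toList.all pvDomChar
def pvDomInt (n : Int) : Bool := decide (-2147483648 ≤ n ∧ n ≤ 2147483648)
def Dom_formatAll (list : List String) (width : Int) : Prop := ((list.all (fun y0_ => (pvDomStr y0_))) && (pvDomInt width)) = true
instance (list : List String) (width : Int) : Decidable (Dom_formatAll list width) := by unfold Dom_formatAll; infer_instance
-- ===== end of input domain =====

-- B replaces A's single fused accumulation loop by a grouping pass (partition items into
-- lines) followed by a separate rendering/join pass: a different decomposition, same cost.
-- Both ports work on List Char (exact: Python str = sequence of code points) and wrap to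
-- String at the end.

-- ===== PORT A =====
-- A's fused loop: state = (text so far, running length); wrap inserts '\n' + indent spaces
-- before appending the quoted item; finally strip ', ' (slice [:-2]) iff list non-empty, add ']'.
def formatAll (list : List String) (width : Int) : String :=
  let text : List Char := "__all__ = [".toList
  let indent : Int := PySem.Chars.len text
  let limit : Int := width - indent
  let st :=
    list.foldl (fun (st : List Char × Int) (item : String) =>
      let length := st.2 + PySem.Str.len item + 4
      if length > limit then
        ((st.1 ++ ('\n' :: List.replicate indent.toNat ' ')) ++
           ('"' :: item.toList ++ ['"', ',', ' ']),
         PySem.Str.len item + 4)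
      else
        (st.1 ++ ('"' :: item.toList ++ ['"', ',', ' ']), length))
      (text, 0)
  let text := if list.length ≠ 0 then PySem.List.slice st.1 none (some (-2)) else st.1
  String.ofList (text ++ [']'])

-- ===== PORT B =====
-- grouping pass: partition the items into lines (greedy, running length resets on wrap)
def groupLines (limit : Int) : List String → Int → List String → List (List String)
  | [], _, cur => [cur]
  | item :: rest, length, cur =>
    let l := length + PySem.Str.len item + 4
    if l > limit then cur :: groupLines limit rest (PySem.Str.len item + 4) [item]
    else groupLines limit rest l (cur ++ [item])

-- rendering of one line: ''.join('"' + it + '", ' for it in line)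
def renderLine (line : List String) : List Char :=
  (line.map (fun it => '"' :: it.toList ++ ['"', ',', ' '])).flatten

def formatAll_alt (list : List String) (width : Int) : String :=
  let header : List Char := "__all__ = [".toList
  let indent : Int := PySem.Chars.len header
  let limit : Int := width - indent
  let lines := groupLines limit list 0 []
  let sep : List Char := '\n' :: List.replicate indent.toNat ' '
  let body := (List.intersperse sep (lines.map renderLine)).flatten
  let text := header ++ body
  let text := if list.length ≠ 0 then PySem.List.slice text none (some (-2)) else text
  String.ofList (text ++ [']'])

-- ===== PRECONDITION & SPEC =====
def Spec_formatAll (list : List String) (width : Int) (out : String) : Prop := out = formatAll_alt list width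
instance (list : List String) (width : Int) (out : String) : Decidable (Spec_formatAll list width out) := by unfold Spec_formatAll; infer_instance

-- ===== CLAIM (what is proved, stated in full; the proofs are below) =====
def Claim_equal_formatAll : Prop := ∀ (list : List String) (width : Int), Dom_formatAll list width → Spec_formatAll list width (formatAll list width)

-- ===== LEMMAS AND PROOFS =====

theorem groupLines_ne_nil (limit : Int) (rest : List String) (length : Int) (cur : List String) :
    groupLines limit rest length cur ≠ [] := by
  induction rest generalizing length cur with
  | nil => simp [groupLines]
  | cons item rest ih =>
      simp only [groupLines]
      split
      · simp
      · exact ih _ _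

theorem flatten_intersperse_cons (sep a : List Char) (l : List (List Char)) (h : l ≠ []) :
    (List.intersperse sep (a :: l)).flatten = a ++ sep ++ (List.intersperse sep l).flatten := by
  cases l with
  | nil => simp at h
  | cons b t => simp [List.intersperse, List.flatten]

theorem renderLine_append_singleton (cur : List String) (item : String) :
    renderLine (cur ++ [item]) = renderLine cur ++ ('"' :: item.toList ++ ['"', ',', ' ']) := by
  simp [renderLine]

-- A's loop over the remaining items, from a state whose text is prefixCs ++ renderLine cur,
-- produces prefixCs followed by B's rendering of the grouped remaining items.
theorem loop_invariant (limit : Int) (sep : List Char) (rest : List String) :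
    ∀ (length : Int) (cur : List String) (prefixCs : List Char),
    sep = '\n' :: List.replicate 11 ' ' →
    (rest.foldl (fun (st : List Char × Int) (item : String) =>
        let l := st.2 + PySem.Str.len item + 4
        if l > limit then
          ((st.1 ++ sep) ++ ('"' :: item.toList ++ ['"', ',', ' ']), PySem.Str.len item + 4)
        else
          (st.1 ++ ('"' :: item.toList ++ ['"', ',', ' ']), l))
      (prefixCs ++ renderLine cur, length)).1
    = prefixCs ++ (List.intersperse sep ((groupLines limit rest length cur).map renderLine)).flatten := by
  induction rest with
  | nil =>
      intro length cur prefixCs _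
      simp [groupLines]
  | cons item rest ih =>
      intro length cur prefixCs hsep
      simp only [List.foldl_cons, groupLines]
      split
      · -- wrap branch
        rename_i h
        rw [show (prefixCs ++ renderLine cur ++ sep) ++ ('"' :: item.toList ++ ['"', ',', ' '])
              = (prefixCs ++ renderLine cur ++ sep) ++ renderLine [item] by
            simp [renderLine]]
        rw [ih (PySem.Str.len item + 4) [item] (prefixCs ++ renderLine cur ++ sep) hsep]
        rw [List.map_cons,
            flatten_intersperse_cons sep (renderLine cur)
              ((groupLines limit rest (PySem.Str.len item + 4) [item]).map renderLine)
              (by simp [groupLines_ne_nil])]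
        simp
      · -- same-line branch
        rename_i h
        rw [show (prefixCs ++ renderLine cur) ++ ('"' :: item.toList ++ ['"', ',', ' '])
              = prefixCs ++ renderLine (cur ++ [item]) by
            rw [renderLine_append_singleton]; simp]
        exact ih _ (cur ++ [item]) prefixCs hsep

-- ===== VERDICT (by name: the statement is the Claim_ definition above) =====
theorem formatAll_spec : Claim_equal_formatAll := by
  intro list width _
  unfold Spec_formatAll formatAll formatAll_alt
  have hlen : PySem.Chars.len "__all__ = [".toList = (11 : Int) := by decide
  simp only [hlen]
  have := loop_invariant (width - 11) ('\n' :: List.replicate 11 ' ') list 0 []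
      "__all__ = [".toList rfl
  simp only [renderLine, List.map_nil, List.flatten_nil, List.append_nil] at this
  simp only [show ((11 : Int)).toNat = 11 from rfl]
  rw [this]
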